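-- pv_equiv track=rewrite | github.com/Coaxecva/COMP4030-Design-and-Analysis-of-Algorithms | Fall2017/hw-sol/hw8/kpdo.py | isRestorable
-- ===== SOURCE A (Python) =====
-- def isRestorable (text, D):
-- 	if len(text) == 0:				# smallest case
-- 		return False
-- 	if len(D) == 0: 				# smallest case
-- 		return False
--
-- 	d = list(D)				 		# make a copy of the list
-- 	u = text    					# set u as the current text
--
-- 	for index in range(len(text)-1, -1, -1):
-- 									# start from the end of u index
-- 		v = u[index:len(u)] 		# v is the text from current index to last index
--
-- 		if v in d:					# check if word is in dict
-- 			d.remove(v) 			# if word is in dict then remove the text from the list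
-- 			u = u[0:index]  		# set new text starting at index 0 to current index in for loop
-- 			if index == 0:  		# if the last word is in dict
-- 				return True 		# return true
--
-- 	return False
-- #-----------------------------------------
-- 	'''
-- 	Logic behind function:
--
-- 	u = thisisacat
-- 	d = { "this", "that", "is", "are", "a", "cat", "dog" }
--
-- 		(1)
-- 			v = u[9:] => t
-- 			v = u[8:] => at
-- 			v = u[7:] => cat
-- 		(2) remove "cat" in d
-- 				d = { "this", "that", "is", "are", "a", "dog" }
-- 		(3) set u = u[0:7] => thisisa
-- 		-----------------
-- 		(1)
-- 			v = u[6:] => a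
-- 		(2) remove "a" in d
-- 				d = { "this", "that", "is", "are", "cat", "dog" }
-- 		(3) set u = u[0:6] => thisis
-- 		-----------------
-- 		(1)
-- 			v = u[5:] => s
-- 			v = u[4:] => is
-- 		(2) remove "is" in d
-- 				d = { "this", "that", "are", "cat", "dog" }
-- 		(3) set u = u[0:4] => this
-- 		-----------------
-- 		(1)
-- 			v = u[3:] => s
-- 			v = u[2:] => is
-- 			v = u[1:] => his
-- 			v = u[0:] => this
-- 		(2) remove "this" in d
-- 				d = {"that", "are", "cat", "dog" }
-- 		(3) if index = 0 and v = u[0:] in d then return true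
--  	'''
-- ===== SOURCE B (Python) =====
-- def isRestorable(text, D):
--     if len(text) == 0:
--         return False
--     if len(D) == 0:
--         return False
--     d = list(D)
--     u = text
--     while len(u) > 0:
--         best = None
--         for w in d:
--             if 0 < len(w) <= len(u) and u[len(u)-len(w):] == w:
--                 if best is None or len(w) < len(best):
--                     best = w
--         if best is None:
--             return False
--         d.remove(best)
--         u = u[:len(u)-len(best)]
--     return True
-- ===== Notes on version B (the rewrite author's own statement) =====
-- stated objective: alternative
-- what changed: A scans text positions from the end with a list-membership test per position; B instead scans the remaining dictionary once per step, keeping the shortest word that is a suffix of the current prefix, and removes that word.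
import Mathlib
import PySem

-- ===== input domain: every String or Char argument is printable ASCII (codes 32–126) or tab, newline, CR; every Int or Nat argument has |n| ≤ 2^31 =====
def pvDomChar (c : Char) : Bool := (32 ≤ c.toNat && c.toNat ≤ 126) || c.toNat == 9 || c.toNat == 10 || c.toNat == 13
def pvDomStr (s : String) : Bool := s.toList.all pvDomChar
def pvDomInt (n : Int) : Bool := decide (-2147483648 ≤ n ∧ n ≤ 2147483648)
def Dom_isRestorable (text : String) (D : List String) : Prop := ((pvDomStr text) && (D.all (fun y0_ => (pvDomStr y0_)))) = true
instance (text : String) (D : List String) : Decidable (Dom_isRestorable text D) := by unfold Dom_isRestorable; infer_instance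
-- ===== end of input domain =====

-- B replaces A's scan over decreasing text positions (with a list-membership test per position)
-- by a scan over the remaining dictionary maintaining the shortest word that is a suffix of the
-- current prefix; same return value, objective: alternative decomposition.

-- ===== PORT A =====
-- the for-loop over range(len(text)-1, -1, -1) with early returns; state (d, u)
def aLoop : List Int → List String → String → Bool
  | [], _, _ => false
  | index :: rest, d, u =>
    let v := PySem.Str.slice u (some index) (some (PySem.Str.len u))   -- v = u[index:len(u)]
    if v ∈ d then
      let d' := (PySem.List.remove? d v).getD d                        -- d.remove(v); v ∈ d, so never the default
      let u' := PySem.Str.slice u (some 0) (some index)                -- u = u[0:index]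
      if index == 0 then true else aLoop rest d' u'
    else aLoop rest d u

def isRestorable (text : String) (D : List String) : Bool :=
  if PySem.Str.len text == 0 then false
  else if D.length == 0 then false
  else aLoop (PySem.List.pyRange (PySem.Str.len text - 1) (-1) (-1)) D text

-- ===== PORT B =====
-- the inner for-loop over d: keep the shortest word w of d that is a nonempty suffix of u
def bsStep (u : String) (best : Option String) (w : String) : Option String :=
  if 0 < PySem.Str.len w ∧ PySem.Str.len w ≤ PySem.Str.len u ∧
      PySem.Str.slice u (some (PySem.Str.len u - PySem.Str.len w)) none = w then
    match best with
    | none => some w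
    | some b => if PySem.Str.len w < PySem.Str.len b then some w else some b
  else best

def bestSuffix (d : List String) (u : String) : Option String := d.foldl (bsStep u) none

-- termination fact for bLoop (cited by its decreasing_by)
theorem bsStep_some_len (u : String) : ∀ (l : List String) (acc : Option String),
    (∀ b, acc = some b → 0 < b.toList.length ∧ b.toList.length ≤ u.toList.length) →
    ∀ w, l.foldl (bsStep u) acc = some w → 0 < w.toList.length ∧ w.toList.length ≤ u.toList.length := by
  intro l
  induction l with
  | nil => intro acc hacc w hw; exact hacc w (by simpa using hw)
  | cons x l ih =>
    intro acc hacc w hw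
    rw [List.foldl_cons] at hw
    refine ih (bsStep u acc x) ?_ w hw
    intro b hb
    unfold bsStep at hb
    split at hb
    · rename_i hc
      obtain ⟨h1, h2, -⟩ := hc
      have hx1 : 0 < x.toList.length := by
        rw [PySem.Str.len_eq] at h1; exact_mod_cast h1
      have hx2 : x.toList.length ≤ u.toList.length := by
        rw [PySem.Str.len_eq, PySem.Str.len_eq] at h2; exact_mod_cast h2
      cases acc with
      | none => cases hb; exact ⟨hx1, hx2⟩
      | some a =>
        rcases ite_eq_iff.mp hb with ⟨-, hbx⟩ | ⟨-, hbx⟩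
        · cases hbx; exact ⟨hx1, hx2⟩
        · cases hbx; exact hacc _ rfl
    · exact hacc b hb

-- the while-loop of B; state (d, u)
def bLoop (d : List String) (u : String) : Bool :=
  if 0 < PySem.Str.len u then
    match h : bestSuffix d u with
    | none => false
    | some w =>
        bLoop ((PySem.List.remove? d w).getD d)
              (PySem.Str.slice u none (some (PySem.Str.len u - PySem.Str.len w)))
  else true
termination_by u.toList.length
decreasing_by
  have hw := bsStep_some_len u d none (by simp) w h
  simp only [String.length_toList] at hw
  have hb : PySem.Str.len u - PySem.Str.len w = ((u.length - w.length : Nat) : Int) := by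
    simp only [PySem.Str.len_eq, String.length_toList]
    omega
  simp only [PySem.Str.toList_slice, PySem.Chars.slice_eq_listSlice, hb,
        PySem.List.slice_to_natCast, List.length_take, String.length_toList]
  omega

def isRestorable_alt (text : String) (D : List String) : Bool :=
  if PySem.Str.len text == 0 then false
  else if D.length == 0 then false
  else bLoop D text

-- ===== PRECONDITION & SPEC =====
def Spec_isRestorable (text : String) (D : List String) (out : Bool) : Prop := out = isRestorable_alt text D
instance (text : String) (D : List String) (out : Bool) : Decidable (Spec_isRestorable text D out) := by unfold Spec_isRestorable; infer_instance

-- ===== CLAIM (what is proved, stated in full; the proofs are below) =====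
def Claim_equal_isRestorable : Prop := ∀ (text : String) (D : List String), Dom_isRestorable text D → Spec_isRestorable text D (isRestorable text D)

-- ===== LEMMAS AND PROOFS =====

-- the suffix of u of length m (as the slice B computes)
def sfx (u : String) (m : Nat) : String :=
  PySem.Str.slice u (some (PySem.Str.len u - (m : Int))) none

-- "w is a nonempty suffix of u": exactly bsStep's condition
def Cand (u w : String) : Prop :=
  0 < PySem.Str.len w ∧ PySem.Str.len w ≤ PySem.Str.len u ∧
    PySem.Str.slice u (some (PySem.Str.len u - PySem.Str.len w)) none = w

-- the index A's downward scan finds: largest j < k with u[j:] in d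
def findM (d : List String) (u : String) : Nat → Option Nat
  | 0 => none
  | k+1 => if sfx u (u.toList.length - k) ∈ d then some k else findM d u k

theorem toList_sfx (u : String) (m : Nat) (hm : m ≤ u.toList.length) :
    (sfx u m).toList = u.toList.drop (u.toList.length - m) := by
  have hb : PySem.Str.len u - (m : Int) = ((u.toList.length - m : Nat) : Int) := by
    simp only [PySem.Str.len_eq]; omega
  simp only [sfx, hb, PySem.Str.toList_slice, PySem.Chars.slice_eq_listSlice,
    PySem.List.slice_from_natCast]

theorem len_sfx (u : String) (m : Nat) (hm : m ≤ u.toList.length) :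
    (sfx u m).toList.length = m := by
  rw [toList_sfx u m hm, List.length_drop]; omega

theorem cand_sfx (u : String) (m : Nat) (h1 : 0 < m) (h2 : m ≤ u.toList.length) :
    Cand u (sfx u m) := by
  have hl : PySem.Str.len (sfx u m) = (m : Int) := by
    rw [PySem.Str.len_eq, len_sfx u m h2]
  refine ⟨by rw [hl]; exact_mod_cast h1,
    by rw [hl, PySem.Str.len_eq]; exact_mod_cast h2, ?_⟩
  rw [hl]; rfl

theorem cand_eq_sfx (u w : String) (h : Cand u w) : w = sfx u w.toList.length := by
  obtain ⟨_, _, h3⟩ := h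
  unfold sfx
  rw [← PySem.Str.len_eq w]
  exact h3.symm

theorem findM_eq_none_iff (d : List String) (u : String) (k : Nat) :
    findM d u k = none ↔ ∀ j, j < k → sfx u (u.toList.length - j) ∉ d := by
  induction k with
  | zero => simp [findM]
  | succ k ih =>
    by_cases hm : sfx u (u.toList.length - k) ∈ d
    · simp only [findM, if_pos hm]
      constructor
      · intro h; cases h
      · intro h; exact absurd hm (h k (Nat.lt_succ_self k))
    · simp only [findM, if_neg hm, ih]
      constructor
      · intro h j hj
        rcases Nat.lt_succ_iff_lt_or_eq.mp hj with h' | h'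
        · exact h j h'
        · subst h'; exact hm
      · intro h j hj; exact h j (by omega)

theorem findM_eq_some_iff (d : List String) (u : String) (k j : Nat) :
    findM d u k = some j ↔
      j < k ∧ sfx u (u.toList.length - j) ∈ d ∧
        ∀ j', j < j' → j' < k → sfx u (u.toList.length - j') ∉ d := by
  induction k with
  | zero => simp [findM]
  | succ k ih =>
    by_cases hm : sfx u (u.toList.length - k) ∈ d
    · simp only [findM, if_pos hm]
      constructor
      · intro h
        have hkj : k = j := by cases h; rfl
        subst hkj
        exact ⟨Nat.lt_succ_self k, hm, fun j' h1 h2 => absurd h1 (by omega)⟩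
      · rintro ⟨h1, h2, h3⟩
        by_cases hkj : j = k
        · subst hkj; rfl
        · exact absurd hm (h3 k (by omega) (Nat.lt_succ_self k))
    · simp only [findM, if_neg hm, ih]
      constructor
      · rintro ⟨h1, h2, h3⟩
        refine ⟨by omega, h2, fun j' hj1 hj2 => ?_⟩
        rcases Nat.lt_succ_iff_lt_or_eq.mp hj2 with h' | h'
        · exact h3 j' hj1 h'
        · subst h'; exact hm
      · rintro ⟨h1, h2, h3⟩
        have hjk : j ≠ k := by rintro rfl; exact hm h2
        exact ⟨by omega, h2, fun j' hj1 hj2 => h3 j' hj1 (by omega)⟩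

theorem bsStep_pos (u w : String) (acc : Option String) (hc : Cand u w) :
    bsStep u acc w =
      match acc with
      | none => some w
      | some b => if PySem.Str.len w < PySem.Str.len b then some w else some b := by
  unfold Cand at hc
  unfold bsStep
  rw [if_pos hc]

theorem bsStep_neg (u w : String) (acc : Option String) (hc : ¬ Cand u w) :
    bsStep u acc w = acc := by
  unfold Cand at hc
  unfold bsStep
  rw [if_neg hc]

theorem fold_none (u : String) : ∀ (l : List String) (acc : Option String),
    (l.foldl (bsStep u) acc = none ↔ acc = none ∧ ∀ w ∈ l, ¬ Cand u w) := by
  intro l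
  induction l with
  | nil => intro acc; simp
  | cons w l ih =>
    intro acc
    rw [List.foldl_cons, ih]
    by_cases hc : Cand u w
    · rw [bsStep_pos u w acc hc]
      constructor
      · rintro ⟨h1, -⟩
        exfalso
        cases acc with
        | none => cases h1
        | some b => rcases ite_eq_iff.mp h1 with ⟨-, h⟩ | ⟨-, h⟩ <;> cases h
      · rintro ⟨-, h2⟩
        exact absurd hc (h2 w List.mem_cons_self)
    · rw [bsStep_neg u w acc hc]
      constructor
      · rintro ⟨h1, h2⟩
        exact ⟨h1, fun w' hw' => by
          rcases List.mem_cons.mp hw' with rfl | h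
          · exact hc
          · exact h2 w' h⟩
      · rintro ⟨h1, h2⟩
        exact ⟨h1, fun w' hw' => h2 w' (List.mem_cons_of_mem w hw')⟩

theorem strlen_lt (w a : String) :
    PySem.Str.len w < PySem.Str.len a ↔ w.toList.length < a.toList.length := by
  simp [PySem.Str.len_eq]

theorem fold_some (u : String) : ∀ (l : List String) (acc : Option String),
    (∀ b, acc = some b → Cand u b) →
    ∀ b, l.foldl (bsStep u) acc = some b →
      Cand u b ∧ (∀ w ∈ l, Cand u w → b.toList.length ≤ w.toList.length) ∧
        (∀ a, acc = some a → b.toList.length ≤ a.toList.length) ∧ (b ∈ l ∨ acc = some b) := by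
  intro l
  induction l with
  | nil =>
    intro acc hacc b hb
    simp only [List.foldl_nil] at hb
    refine ⟨hacc b hb, by simp, fun a ha => ?_, Or.inr hb⟩
    rw [hb] at ha; cases ha; exact le_refl _
  | cons w l ih =>
    intro acc hacc b hb
    rw [List.foldl_cons] at hb
    by_cases hc : Cand u w
    · rw [bsStep_pos u w acc hc] at hb
      cases acc with
      | none =>
        obtain ⟨hcb, hmin, haccle, hmem⟩ := ih (some w) (fun b' hb' => by cases hb'; exact hc) b hb
        refine ⟨hcb, ?_, by rintro a ⟨⟩, ?_⟩
        · intro w' hw' hcw'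
          rcases List.mem_cons.mp hw' with rfl | h
          · exact haccle w' rfl
          · exact hmin w' h hcw'
        · rcases hmem with h | h
          · exact Or.inl (List.mem_cons_of_mem w h)
          · cases h; exact Or.inl List.mem_cons_self
      | some a =>
        have hred : (match some a with
            | none => some w
            | some b => if PySem.Str.len w < PySem.Str.len b then some w else some b) =
            if PySem.Str.len w < PySem.Str.len a then some w else some a := rfl
        rw [hred] at hb
        by_cases hlt : PySem.Str.len w < PySem.Str.len a
        · rw [if_pos hlt] at hb
          obtain ⟨hcb, hmin, haccle, hmem⟩ := ih (some w) (fun b' hb' => by cases hb'; exact hc) b hb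
          have hbw := haccle w rfl
          have hwa : w.toList.length < a.toList.length := (strlen_lt w a).mp hlt
          refine ⟨hcb, ?_, ?_, ?_⟩
          · intro w' hw' hcw'
            rcases List.mem_cons.mp hw' with rfl | h
            · exact hbw
            · exact hmin w' h hcw'
          · intro x hx; cases hx; omega
          · rcases hmem with h | h
            · exact Or.inl (List.mem_cons_of_mem w h)
            · cases h; exact Or.inl List.mem_cons_self
        · rw [if_neg hlt] at hb
          obtain ⟨hcb, hmin, haccle, hmem⟩ := ih (some a) (fun b' hb' => by cases hb'; exact hacc a rfl) b hb
          have hba := haccle a rfl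
          have haw : a.toList.length ≤ w.toList.length := by
            have := (strlen_lt a w)
            have := (strlen_lt w a)
            omega
          refine ⟨hcb, ?_, ?_, ?_⟩
          · intro w' hw' hcw'
            rcases List.mem_cons.mp hw' with rfl | h
            · omega
            · exact hmin w' h hcw'
          · intro x hx; cases hx; exact hba
          · rcases hmem with h | h
            · exact Or.inl (List.mem_cons_of_mem w h)
            · exact Or.inr h
    · rw [bsStep_neg u w acc hc] at hb
      obtain ⟨hcb, hmin, haccle, hmem⟩ := ih acc hacc b hb
      refine ⟨hcb, ?_, haccle, ?_⟩
      · intro w' hw' hcw'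
        rcases List.mem_cons.mp hw' with rfl | h
        · exact absurd hcw' hc
        · exact hmin w' h hcw'
      · rcases hmem with h | h
        · exact Or.inl (List.mem_cons_of_mem w h)
        · exact Or.inr h

theorem lemB (d : List String) (u : String) :
    bestSuffix d u = (findM d u u.toList.length).map (fun j => sfx u (u.toList.length - j)) := by
  cases hbs : bestSuffix d u with
  | none =>
    unfold bestSuffix at hbs
    obtain ⟨-, hno⟩ := (fold_none u d none).mp hbs
    have hfm : findM d u u.toList.length = none := by
      rw [findM_eq_none_iff]
      intro j hj hmem
      exact hno _ hmem (cand_sfx u (u.toList.length - j) (by omega) (by omega))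
    rw [hfm]; rfl
  | some b =>
    unfold bestSuffix at hbs
    obtain ⟨hcb, hmin, -, hmem⟩ := fold_some u d none (by simp) b hbs
    have hbmem : b ∈ d := by
      rcases hmem with h | h
      · exact h
      · cases h
    have hm1 : 0 < b.toList.length := by
      have h := hcb.1; rw [PySem.Str.len_eq] at h; exact_mod_cast h
    have hm2 : b.toList.length ≤ u.toList.length := by
      have h := hcb.2.1; rw [PySem.Str.len_eq, PySem.Str.len_eq] at h; exact_mod_cast h
    have hsfxb : sfx u b.toList.length = b := (cand_eq_sfx u b hcb).symm
    have hj : findM d u u.toList.length = some (u.toList.length - b.toList.length) := by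
      rw [findM_eq_some_iff]
      refine ⟨by omega, ?_, ?_⟩
      · rw [show u.toList.length - (u.toList.length - b.toList.length) = b.toList.length by omega,
          hsfxb]
        exact hbmem
      · intro j' h1 h2 hmem'
        have hcand := cand_sfx u (u.toList.length - j') (by omega) (by omega)
        have := hmin _ hmem' hcand
        rw [len_sfx u (u.toList.length - j') (by omega)] at this
        omega
    rw [hj, Option.map_some]
    rw [show u.toList.length - (u.toList.length - b.toList.length) = b.toList.length by omega,
      hsfxb]

theorem slice_eq_sfx (u : String) (k : Nat) (hk : k < u.toList.length) :
    PySem.Str.slice u (some (k : Int)) (some (PySem.Str.len u)) = sfx u (u.toList.length - k) := by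
  apply String.toList_inj.mp
  rw [toList_sfx u _ (by omega)]
  rw [show u.toList.length - (u.toList.length - k) = k by omega]
  rw [PySem.Str.toList_slice, PySem.Chars.slice_eq_listSlice, PySem.Str.len_eq,
    PySem.List.slice_natCast]
  apply List.take_of_length_le
  simp

theorem lemA (d : List String) (u : String) :
    ∀ k, k ≤ u.toList.length →
    aLoop (PySem.List.pyRange ((k : Int) - 1) (-1) (-1)) d u =
      match findM d u k with
      | none => false
      | some j =>
        if j = 0 then true
        else aLoop (PySem.List.pyRange ((j : Int) - 1) (-1) (-1))
                   ((PySem.List.remove? d (sfx u (u.toList.length - j))).getD d)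
                   (PySem.Str.slice u (some 0) (some (j : Int))) := by
  intro k
  induction k with
  | zero =>
    intro _
    rw [show ((0 : Nat) : Int) - 1 = -1 by rfl]
    rw [PySem.List.pyRange_neg_one_eq_nil (by omega)]
    rfl
  | succ k ih =>
    intro hk
    rw [show ((k + 1 : Nat) : Int) - 1 = (k : Int) by push_cast; ring]
    rw [PySem.List.pyRange_neg_one_cons (by omega)]
    simp only [aLoop]
    rw [slice_eq_sfx u k (by omega)]
    by_cases hm : sfx u (u.toList.length - k) ∈ d
    · rw [if_pos hm]
      simp only [findM, if_pos hm]
      by_cases hk0 : k = 0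
      · subst hk0; simp
      · simp only [hk0, if_false, beq_iff_eq]
        rw [if_neg (by exact_mod_cast hk0)]
    · rw [if_neg hm]
      simp only [findM, if_neg hm]
      exact ih (by omega)

theorem toList_slice0 (u : String) (j : Nat) :
    (PySem.Str.slice u (some 0) (some (j : Int))).toList = u.toList.take j := by
  rw [PySem.Str.toList_slice, PySem.Chars.slice_eq_listSlice]
  rw [show ((0 : Int)) = ((0 : Nat) : Int) by rfl, PySem.List.slice_natCast]
  simp

theorem mainLoop : ∀ (n : Nat) (d : List String) (u : String), u.toList.length = n →
    0 < u.toList.length →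
    aLoop (PySem.List.pyRange ((u.toList.length : Int) - 1) (-1) (-1)) d u = bLoop d u := by
  intro n
  induction n using Nat.strong_induction_on with
  | _ n ih =>
    intro d u hn hpos
    rw [bLoop]
    rw [if_pos (by rw [PySem.Str.len_eq]; exact_mod_cast hpos)]
    rw [lemA d u u.toList.length (le_refl _)]
    cases hf : findM d u u.toList.length with
    | none =>
      have hbs : bestSuffix d u = none := by rw [lemB, hf]; rfl
      split
      · split
        · rfl
        · rename_i w hw; rw [hbs] at hw; cases hw
      · rename_i j heq; cases heq
    | some j =>
      obtain ⟨hjn, hjmem, -⟩ := (findM_eq_some_iff d u _ j).mp hf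
      have hbs : bestSuffix d u = some (sfx u (u.toList.length - j)) := by
        rw [lemB, hf]; rfl
      split
      · rename_i heq; cases heq
      · rename_i j' heq
        injection heq with heq
        subst heq
        have hlenw : PySem.Str.len (sfx u (u.toList.length - j)) = ((u.toList.length - j : Nat) : Int) := by
          rw [PySem.Str.len_eq, len_sfx u _ (by omega)]
        have harg : PySem.Str.len u - PySem.Str.len (sfx u (u.toList.length - j)) = (j : Int) := by
          rw [hlenw, PySem.Str.len_eq]; omega
        have huB : PySem.Str.slice u none (some (j : Int)) = PySem.Str.slice u (some 0) (some (j : Int)) := by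
          apply String.toList_inj.mp
          rw [toList_slice0]
          rw [PySem.Str.toList_slice, PySem.Chars.slice_eq_listSlice, PySem.List.slice_to_natCast]
        have hlen' : (PySem.Str.slice u (some 0) (some (j : Int))).toList.length = j := by
          rw [toList_slice0, List.length_take]; omega
        by_cases hj0 : j = 0
        · rw [if_pos hj0]
          split
          · rename_i hw; rw [hbs] at hw; cases hw
          · rename_i w hw
            rw [hbs] at hw; cases hw
            rw [harg, huB]
            rw [bLoop]
            rw [if_neg (by rw [PySem.Str.len_eq, hlen', hj0]; simp)]
        · rw [if_neg hj0]
          split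
          · rename_i hw; rw [hbs] at hw; cases hw
          · rename_i w hw
            rw [hbs] at hw; cases hw
            rw [harg, huB]
            have hrec := ih j (by omega) ((PySem.List.remove? d (sfx u (u.toList.length - j))).getD d)
              (PySem.Str.slice u (some 0) (some (j : Int))) hlen' (by omega)
            rw [hlen'] at hrec
            exact hrec

-- ===== VERDICT (by name: the statement is the Claim_ definition above) =====
theorem isRestorable_spec : Claim_equal_isRestorable := by
  intro text D _
  unfold Spec_isRestorable isRestorable isRestorable_alt
  by_cases h0 : (PySem.Str.len text == 0) = true
  · rw [if_pos h0, if_pos h0]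
  · rw [if_neg h0, if_neg h0]
    by_cases hD : (D.length == 0) = true
    · rw [if_pos hD, if_pos hD]
    · rw [if_neg hD, if_neg hD]
      have hpos : 0 < text.toList.length := by
        rw [PySem.Str.len_eq] at h0
        simp only [beq_iff_eq] at h0
        omega
      have hml := mainLoop text.toList.length D text rfl hpos
      rw [PySem.Str.len_eq]
      exact hml
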